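-- pv_equiv track=rewrite | github.com/MinTreesLearn/ML | Codeforces Submissions/1296/C/171024549.py | solution
-- ===== SOURCE A (Python) =====
-- def solution(s):
--
--     def coordToString(coord):
--
--         return str(coord[0]) + "," + str(coord[1])
--
--
--
--     locations = {}
--
--     shortest = [-1, -1]
--
--     shortest_l = float('inf')
--
--     curr_coord = [0, 0]
--
--     locations[coordToString(curr_coord)] = -1
--
--     for i in range(len(s)):
--
--         ch = s[i]
--
--         if ch == 'L':
--
--             curr_coord[0] -= 1
--
--         elif ch == 'R':
--
--             curr_coord[0] += 1
--
--         elif ch == 'U':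
--
--             curr_coord[1] += 1
--
--         else:
--
--             curr_coord[1] -= 1
--
--         coord_string = coordToString(curr_coord)
--
--         if coord_string in locations:
--
--             if i - locations[coord_string] < shortest_l:
--
--                 shortest_l = i - locations[coord_string]
--
--                 shortest = [locations[coord_string]+2, i+1]
--
--         locations[coord_string] = i
--
--     return shortest if shortest[0] != -1 else [-1]
-- ===== SOURCE B (Python) =====
-- def solution(s):
--     # One pass: record, per coordinate, every index at which the walk sits there
--     # (the origin counts as index -1).  Then scan each coordinate's occurrence
--     # list: consecutive occurrences (a, b) allow removing s[a+1..b], length b-a.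
--     # The best candidate is the lexicographic minimum of (length, b).
--     occ = {(0, 0): [-1]}
--     x = y = 0
--     for i, ch in enumerate(s):
--         if ch == 'L':
--             x -= 1
--         elif ch == 'R':
--             x += 1
--         elif ch == 'U':
--             y += 1
--         else:
--             y -= 1
--         occ.setdefault((x, y), []).append(i)
--     best = None
--     for idxs in occ.values():
--         for a, b in zip(idxs, idxs[1:]):
--             if best is None or (b - a, b) < best:
--                 best = (b - a, b)
--     if best is None:
--         return [-1]
--     length, b = best
--     return [b - length + 2, b + 1]
-- ===== Notes on version B (the rewrite author's own statement) =====
-- stated objective: alternative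
-- what changed: Instead of a single pass that keys a dict by a stringified coordinate and updates a running minimum under a float-inf sentinel, B builds in one pass a dict from coordinate tuples to the full list of visit indices, then scans consecutive index pairs of each occurrence list taking the lexicographic minimum of (length, end index).
import Mathlib
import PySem

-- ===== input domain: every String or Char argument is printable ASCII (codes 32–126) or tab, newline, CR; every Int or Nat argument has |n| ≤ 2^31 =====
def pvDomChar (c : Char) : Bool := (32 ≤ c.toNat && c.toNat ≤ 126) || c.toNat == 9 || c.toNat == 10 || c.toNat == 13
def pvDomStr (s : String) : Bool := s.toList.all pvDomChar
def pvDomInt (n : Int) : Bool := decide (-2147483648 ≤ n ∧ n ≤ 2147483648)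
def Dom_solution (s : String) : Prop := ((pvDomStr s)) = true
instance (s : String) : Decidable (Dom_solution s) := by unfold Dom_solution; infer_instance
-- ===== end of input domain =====

-- B replaces A's string-keyed last-visit dict and running minimum by a coordinate-keyed
-- dict of full occurrence lists scanned for the lexicographically best consecutive pair
-- (alternative decomposition, same asymptotic cost).


-- ===== PORT A =====
-- str(coord[0]) + "," + str(coord[1]), kept as the string's character list (PySem.Chars form)
def coordToString (coord : Int × Int) : List Char :=
  PySem.Int.toChars coord.1 ++ [','] ++ PySem.Int.toChars coord.2

-- one iteration of A's loop; state = (curr_coord, locations, shortest, shortest_l).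
-- float('inf') is ported as `none : Option Int`: the only float is the initial sentinel, the
-- comparison `i - loc < inf` is always true, and every value later stored is an int (exact here).
def solutionStepA (st : (Int × Int) × PySem.Dict (List Char) Int × List Int × Option Int)
    (p : Int × Char) : (Int × Int) × PySem.Dict (List Char) Int × List Int × Option Int :=
  let i := p.1
  let ch := p.2
  let c := st.1
  let curr : Int × Int :=
    if ch = 'L' then (c.1 - 1, c.2)
    else if ch = 'R' then (c.1 + 1, c.2)
    else if ch = 'U' then (c.1, c.2 + 1)
    else (c.1, c.2 - 1)
  let coordString := coordToString curr
  -- `if coord_string in locations:` with the subsequent lookup, as one match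
  match st.2.1.get? coordString with
  | some loc =>
      match st.2.2.2 with
      | none =>
          (curr, st.2.1.insert coordString i, [loc + 2, i + 1], some (i - loc))
      | some l =>
          if i - loc < l then
            (curr, st.2.1.insert coordString i, [loc + 2, i + 1], some (i - loc))
          else
            (curr, st.2.1.insert coordString i, st.2.2.1, st.2.2.2)
  | none => (curr, st.2.1.insert coordString i, st.2.2.1, st.2.2.2)

def solution (s : String) : List Int :=
  let locations : PySem.Dict (List Char) Int :=
    (PySem.Dict.mk []).insert (coordToString (0, 0)) (-1)
  let st := (PySem.List.enumerate s.toList).foldl solutionStepA ((0, 0), locations, [-1, -1], none)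
  let shortest := st.2.2.1
  if PySem.List.pyGet? shortest 0 ≠ some (-1) then shortest else [-1]

-- ===== PORT B =====
-- pass 1: `occ.setdefault((x, y), []).append(i)` after the move
def solutionStepB (st : (Int × Int) × PySem.Dict (Int × Int) (List Int))
    (p : Int × Char) : (Int × Int) × PySem.Dict (Int × Int) (List Int) :=
  let i := p.1
  let ch := p.2
  let c := st.1
  let pos : Int × Int :=
    if ch = 'L' then (c.1 - 1, c.2)
    else if ch = 'R' then (c.1 + 1, c.2)
    else if ch = 'U' then (c.1, c.2 + 1)
    else (c.1, c.2 - 1)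
  (pos, st.2.insert pos (st.2.getD pos [] ++ [i]))

-- `if best is None or (b - a, b) < best: best = (b - a, b)`  (tuple comparison is lexicographic)
def lexUpdate (best : Option (Int × Int)) (ab : Int × Int) : Option (Int × Int) :=
  match best with
  | none => some (ab.2 - ab.1, ab.2)
  | some t =>
      if ab.2 - ab.1 < t.1 ∨ (ab.2 - ab.1 = t.1 ∧ ab.2 < t.2) then some (ab.2 - ab.1, ab.2)
      else some t

def solution_alt (s : String) : List Int :=
  let occ0 : PySem.Dict (Int × Int) (List Int) := (PySem.Dict.mk []).insert (0, 0) [-1]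
  let occ := ((PySem.List.enumerate s.toList).foldl solutionStepB ((0, 0), occ0)).2
  let best := occ.values.foldl
    (fun best idxs => (idxs.zip (PySem.List.slice idxs (some 1) none)).foldl lexUpdate best) none
  match best with
  | none => [-1]
  | some t => [t.2 - t.1 + 2, t.2 + 1]

-- ===== PRECONDITION & SPEC =====
def Spec_solution (s : String) (out : List Int) : Prop := out = solution_alt s
instance (s : String) (out : List Int) : Decidable (Spec_solution s out) := by unfold Spec_solution; infer_instance

-- ===== CLAIM (what is proved, stated in full; the proofs are below) =====
def Claim_equal_solution : Prop := ∀ (s : String), Dom_solution s → Spec_solution s (solution s)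

-- ===== LEMMAS AND PROOFS =====

-- ---------- str(n) as a list of characters: characterisation and injectivity ----------

-- str(n) for a natural number, by its own recursion
def natRep (n : Nat) : List Char :=
  if h : n < 10 then [Nat.digitChar n]
  else natRep (n / 10) ++ [Nat.digitChar (n % 10)]
  decreasing_by exact Nat.div_lt_self (by omega) (by omega)

theorem natRep_lt {n : Nat} (h : n < 10) : natRep n = [Nat.digitChar n] := by
  rw [natRep]; simp [h]

theorem natRep_ge {n : Nat} (h : ¬ n < 10) :
    natRep n = natRep (n / 10) ++ [Nat.digitChar (n % 10)] := by
  rw [natRep]; simp [h]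

theorem toDigitsCore_eq_natRep :
    ∀ (f n : Nat) (ds : List Char), n < 10 ^ f → 0 < f →
      Nat.toDigitsCore 10 f n ds = natRep n ++ ds := by
  intro f
  induction f with
  | zero => intro n ds _ h0; omega
  | succ f ih =>
    intro n ds h _
    by_cases h10 : n < 10
    · have hdiv : n / 10 = 0 := Nat.div_eq_of_lt h10
      have hmod : n % 10 = n := Nat.mod_eq_of_lt h10
      simp [Nat.toDigitsCore, hdiv, hmod, natRep_lt h10]
    · have hdiv : ¬ n / 10 = 0 := by omega
      have hlt : n / 10 < 10 ^ f := by
        rw [Nat.div_lt_iff_lt_mul (by norm_num)]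
        rw [← pow_succ]
        exact h
      have hf : 0 < f := by
        by_contra hf0
        have : f = 0 := by omega
        subst this
        simp at h
        omega
      rw [show Nat.toDigitsCore 10 (f + 1) n ds
            = Nat.toDigitsCore 10 f (n / 10) (Nat.digitChar (n % 10) :: ds) by
          simp [Nat.toDigitsCore, hdiv]]
      rw [ih _ _ hlt hf, natRep_ge h10]
      simp

theorem toDigits_eq_natRep (n : Nat) : Nat.toDigits 10 n = natRep n := by
  have h : n < 10 ^ (n + 1) :=
    Nat.lt_of_lt_of_le (Nat.lt_pow_self (by norm_num))
      (Nat.pow_le_pow_right (by norm_num) (Nat.le_succ n))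
  simpa using toDigitsCore_eq_natRep (n + 1) n [] h (by omega)

theorem natRep_mem (n : Nat) : ∀ ch ∈ natRep n, ∃ d, d < 10 ∧ ch = Nat.digitChar d := by
  induction n using Nat.strong_induction_on with
  | _ n ih =>
    intro ch hch
    by_cases h10 : n < 10
    · rw [natRep_lt h10] at hch; simp at hch
      exact ⟨n, h10, hch⟩
    · rw [natRep_ge h10] at hch; simp at hch
      rcases hch with hch | hch
      · exact ih (n / 10) (Nat.div_lt_self (by omega) (by omega)) ch hch
      · exact ⟨n % 10, by omega, hch⟩

theorem natRep_ne_nil (n : Nat) : natRep n ≠ [] := by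
  by_cases h10 : n < 10
  · rw [natRep_lt h10]; simp
  · rw [natRep_ge h10]; simp

theorem natRep_head (n : Nat) : ∃ d tl, d < 10 ∧ natRep n = Nat.digitChar d :: tl := by
  induction n using Nat.strong_induction_on with
  | _ n ih =>
    by_cases h10 : n < 10
    · exact ⟨n, [], h10, natRep_lt h10⟩
    · obtain ⟨d, tl, hd, htl⟩ := ih (n / 10) (Nat.div_lt_self (by omega) (by omega))
      exact ⟨d, tl ++ [Nat.digitChar (n % 10)], hd, by rw [natRep_ge h10, htl]; simp⟩

theorem digitChar_inj10 : ∀ d < 10, ∀ e < 10, Nat.digitChar d = Nat.digitChar e → d = e := by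
  decide

theorem natRep_inj : ∀ n m : Nat, natRep n = natRep m → n = m := by
  intro n
  induction n using Nat.strong_induction_on with
  | _ n ih =>
    intro m h
    by_cases hn : n < 10 <;> by_cases hm : m < 10
    · rw [natRep_lt hn, natRep_lt hm] at h
      simp at h
      exact digitChar_inj10 n hn m hm h
    · rw [natRep_lt hn, natRep_ge hm] at h
      have h0 := congrArg List.length h
      simp only [List.length_append, List.length_cons, List.length_nil] at h0
      exact absurd (List.length_eq_zero_iff.mp (by omega)) (natRep_ne_nil (m / 10))
    · rw [natRep_ge hn, natRep_lt hm] at h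
      have h0 := congrArg List.length h
      simp only [List.length_append, List.length_cons, List.length_nil] at h0
      exact absurd (List.length_eq_zero_iff.mp (by omega)) (natRep_ne_nil (n / 10))
    · rw [natRep_ge hn, natRep_ge hm] at h
      have h1 : (natRep (n / 10) ++ [Nat.digitChar (n % 10)]).getLast? =
          (natRep (m / 10) ++ [Nat.digitChar (m % 10)]).getLast? := by rw [h]
      have h2 : (natRep (n / 10) ++ [Nat.digitChar (n % 10)]).dropLast =
          (natRep (m / 10) ++ [Nat.digitChar (m % 10)]).dropLast := by rw [h]
      rw [List.getLast?_concat, List.getLast?_concat] at h1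
      rw [List.dropLast_concat, List.dropLast_concat] at h2
      have hmod : n % 10 = m % 10 :=
        digitChar_inj10 _ (by omega) _ (by omega) (Option.some.inj h1)
      have hdivq : n / 10 = m / 10 := ih (n / 10) (Nat.div_lt_self (by omega) (by omega)) _ h2
      omega

theorem digitChar_ne_minus : ∀ d < 10, Nat.digitChar d ≠ '-' := by decide

theorem digitChar_ne_comma : ∀ d < 10, Nat.digitChar d ≠ ',' := by decide

theorem toChars_inj : ∀ a b : Int, PySem.Int.toChars a = PySem.Int.toChars b → a = b := by
  intro a b h
  unfold PySem.Int.toChars at h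
  simp only [toDigits_eq_natRep] at h
  split_ifs at h with ha hb hb
  · have := natRep_inj _ _ (List.cons.inj h).2
    omega
  · obtain ⟨d, tl, hd, htl⟩ := natRep_head b.toNat
    rw [htl] at h
    exact absurd ((List.cons.inj h).1.symm) (digitChar_ne_minus d hd)
  · obtain ⟨d, tl, hd, htl⟩ := natRep_head a.toNat
    rw [htl] at h
    exact absurd ((List.cons.inj h).1) (digitChar_ne_minus d hd)
  · have := natRep_inj _ _ h
    omega

theorem comma_not_mem_toChars (n : Int) : ',' ∉ PySem.Int.toChars n := by
  intro hmem
  unfold PySem.Int.toChars at hmem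
  simp only [toDigits_eq_natRep] at hmem
  split_ifs at hmem with hn
  · rcases List.mem_cons.mp hmem with h | h
    · exact (by decide : ('-' : Char) ≠ ',') h.symm
    · obtain ⟨d, hd, hch⟩ := natRep_mem _ _ h
      exact digitChar_ne_comma d hd hch.symm
  · obtain ⟨d, hd, hch⟩ := natRep_mem _ _ hmem
    exact digitChar_ne_comma d hd hch.symm

theorem append_comma_inj :
    ∀ (a : List Char) (b : List Char) (a' b' : List Char), ',' ∉ a → ',' ∉ a' →
      a ++ ',' :: b = a' ++ ',' :: b' → a = a' ∧ b = b' := by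
  intro a
  induction a with
  | nil =>
    intro b a' b' _ ha'
    cases a' with
    | nil => simp
    | cons x t =>
      intro h
      simp at h
      exact absurd (h.1 ▸ (by simp : x ∈ x :: t)) (h.1 ▸ ha')
  | cons x t ih =>
    intro b a' b' ha ha'
    cases a' with
    | nil =>
      intro h
      simp at h
      exact absurd (h.1 ▸ (by simp : x ∈ x :: t)) (h.1 ▸ ha)
    | cons y t' =>
      intro h
      simp only [List.cons_append, List.cons.injEq] at h
      obtain ⟨h1, h2⟩ := h
      have := ih b t' b' (by simp at ha; tauto) (by simp at ha'; tauto) h2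
      exact ⟨by rw [h1, this.1], this.2⟩

theorem coordToString_inj : ∀ c c' : Int × Int, coordToString c = coordToString c' → c = c' := by
  intro c c' h
  unfold coordToString at h
  rw [List.append_assoc, List.append_assoc] at h
  simp only [List.singleton_append] at h
  obtain ⟨h1, h2⟩ := append_comma_inj _ _ _ _
    (comma_not_mem_toChars c.1) (comma_not_mem_toChars c'.1) h
  exact Prod.ext (toChars_inj _ _ h1) (toChars_inj _ _ h2)

-- ---------- candidate pairs and the lexicographic fold ----------

def pairsConsec (l : List Int) : List (Int × Int) := l.zip l.tail

def candFlat (coords : List (Int × Int)) (occf : Int × Int → List Int) : List (Int × Int) :=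
  (coords.map (fun c => pairsConsec (occf c))).flatten

def encodeA : Option (Int × Int) → List Int × Option Int
  | none => ([-1, -1], none)
  | some t => ([t.2 - t.1 + 2, t.2 + 1], some t.1)

theorem lexUpdate_rcomm (b : Option (Int × Int)) (x y : Int × Int) :
    lexUpdate (lexUpdate b x) y = lexUpdate (lexUpdate b y) x := by
  rcases b with _ | ⟨t1, t2⟩
  · rcases x with ⟨x1, x2⟩; rcases y with ⟨y1, y2⟩
    simp only [lexUpdate]
    split_ifs <;> simp only [Option.some.injEq, Prod.mk.injEq] <;> omega
  · rcases x with ⟨x1, x2⟩; rcases y with ⟨y1, y2⟩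
    simp only [lexUpdate]
    split_ifs <;> simp only [lexUpdate] <;> split_ifs <;>
      simp only [Option.some.injEq, Prod.mk.injEq] <;> omega

theorem foldl_lexUpdate_pull (r : List (Int × Int)) :
    ∀ (b : Option (Int × Int)) (x : Int × Int),
      r.foldl lexUpdate (lexUpdate b x) = lexUpdate (r.foldl lexUpdate b) x := by
  induction r with
  | nil => intro b x; rfl
  | cons y r ih =>
    intro b x
    simp only [List.foldl_cons]
    rw [lexUpdate_rcomm, ih]

theorem foldl_lexUpdate_range (F : List (Int × Int)) :
    ∀ b : Option (Int × Int),
      F.foldl lexUpdate b = b ∨ ∃ ab ∈ F, F.foldl lexUpdate b = some (ab.2 - ab.1, ab.2) := by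
  induction F with
  | nil => intro b; left; rfl
  | cons x F ih =>
    intro b
    simp only [List.foldl_cons]
    have hx : lexUpdate b x = b ∨ lexUpdate b x = some (x.2 - x.1, x.2) := by
      rcases b with _ | t
      · right; rfl
      · simp only [lexUpdate]
        split_ifs
        · right; rfl
        · left; rfl
    rcases ih (lexUpdate b x) with h | h
    · rcases hx with hx | hx
      · left; rw [h, hx]
      · right; exact ⟨x, by simp, by rw [h, hx]⟩
    · obtain ⟨ab, hab, habe⟩ := h
      right; exact ⟨ab, by simp [hab], habe⟩

theorem mem_pairsConsec {ab : Int × Int} {l : List Int} (h : ab ∈ pairsConsec l) :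
    ab.1 ∈ l ∧ ab.2 ∈ l := by
  obtain ⟨a, b⟩ := ab
  have := List.of_mem_zip h
  exact ⟨this.1, List.tail_subset l this.2⟩

theorem mem_candFlat {ab : Int × Int} {coords : List (Int × Int)} {occf : Int × Int → List Int}
    (h : ab ∈ candFlat coords occf) : ∃ c ∈ coords, ab ∈ pairsConsec (occf c) := by
  unfold candFlat at h
  rw [List.mem_flatten] at h
  obtain ⟨l, hl, habl⟩ := h
  rw [List.mem_map] at hl
  obtain ⟨c, hc, rfl⟩ := hl
  exact ⟨c, hc, habl⟩

theorem pairsConsec_concat :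
    ∀ (l : List Int) (v x : Int), l.getLast? = some v →
      pairsConsec (l ++ [x]) = pairsConsec l ++ [(v, x)] := by
  intro l
  induction l with
  | nil => intro v x h; simp at h
  | cons a l ih =>
    intro v x h
    cases l with
    | nil =>
      simp at h
      subst h
      rfl
    | cons b l =>
      have h' : (b :: l).getLast? = some v := by
        rw [List.getLast?_cons_cons] at h
        exact h
      have hh := ih v x h'
      simp only [pairsConsec, List.cons_append, List.tail_cons, List.zip_cons_cons] at hh ⊢
      exact congrArg _ hh

-- ---------- dict items shaped as a keyed map ----------

theorem find?_keyed (coords : List (Int × Int)) (occf : Int × Int → List Int) (c : Int × Int) :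
    ((coords.map fun c' => (c', occf c')).find? (fun p => p.1 == c)) =
      if c ∈ coords then some (c, occf c) else none := by
  induction coords with
  | nil => rfl
  | cons d coords ih =>
    by_cases hdc : d = c
    · subst hdc
      simp [List.find?_cons]
    · simp only [List.map_cons, List.find?_cons]
      have : ((d, occf d).1 == c) = false := by simpa using hdc
      rw [this]
      simp only [List.mem_cons]
      rw [ih]
      by_cases hc : c ∈ coords <;> simp [hc, Ne.symm hdc]

-- ---------- the joint invariant ----------

def InvAB (i : Int) (stA : (Int × Int) × PySem.Dict (List Char) Int × List Int × Option Int)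
    (stB : (Int × Int) × PySem.Dict (Int × Int) (List Int))
    (coords : List (Int × Int)) (occf : Int × Int → List Int) : Prop :=
  stA.1 = stB.1 ∧
  (∀ c : Int × Int, stA.2.1.get? (coordToString c) = (occf c).getLast?) ∧
  stB.2.items = coords.map (fun c => (c, occf c)) ∧
  coords.Nodup ∧
  (∀ c, c ∈ coords ↔ occf c ≠ []) ∧
  (stA.2.2.1, stA.2.2.2) = encodeA ((candFlat coords occf).foldl lexUpdate none) ∧
  0 ≤ i ∧
  (∀ c, ∀ x ∈ occf c, -1 ≤ x ∧ x < i)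

theorem nodup_split {u w : List (Int × Int)} {c : Int × Int}
    (h : (u ++ c :: w).Nodup) : c ∉ u ∧ c ∉ w := by
  simp only [List.nodup_append, List.nodup_cons] at h
  obtain ⟨hu, ⟨hcw, hwnd⟩, hdis⟩ := h
  exact ⟨fun hc => hdis c hc c (by simp) rfl, hcw⟩

theorem foldl_insert_middle (U W : List (List (Int × Int))) (P : List (Int × Int))
    (y : Int × Int) (b : Option (Int × Int)) :
    (U ++ (P ++ [y]) :: W).flatten.foldl lexUpdate b =
      lexUpdate ((U ++ P :: W).flatten.foldl lexUpdate b) y := by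
  simp only [List.flatten_append, List.flatten_cons, List.foldl_append,
    List.foldl_cons, List.foldl_nil]
  rw [foldl_lexUpdate_pull]

theorem best_step (coords : List (Int × Int)) (occf : Int × Int → List Int)
    (cpos : Int × Int) (v i : Int)
    (hmem : cpos ∈ coords) (hnd : coords.Nodup) (hlast : (occf cpos).getLast? = some v) :
    (candFlat coords (fun c => if c = cpos then occf cpos ++ [i] else occf c)).foldl lexUpdate none
      = lexUpdate ((candFlat coords occf).foldl lexUpdate none) (v, i) := by
  obtain ⟨u, w, rfl⟩ := List.append_of_mem hmem
  obtain ⟨hu, hw⟩ := nodup_split hnd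
  have hmap : (u ++ cpos :: w).map
        (fun c => pairsConsec (if c = cpos then occf cpos ++ [i] else occf c)) =
      u.map (fun c => pairsConsec (occf c)) ++
        (pairsConsec (occf cpos) ++ [(v, i)]) :: w.map (fun c => pairsConsec (occf c)) := by
    rw [List.map_append, List.map_cons]
    congr 1
    · exact List.map_congr_left (fun c hc =>
        congrArg pairsConsec (if_neg (fun heq : c = cpos => hu (heq ▸ hc))))
    · congr 1
      · rw [if_pos rfl]
        exact pairsConsec_concat _ v i hlast
      · exact List.map_congr_left (fun c hc =>
          congrArg pairsConsec (if_neg (fun heq : c = cpos => hw (heq ▸ hc))))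
  show (((u ++ cpos :: w).map
      (fun c => pairsConsec (if c = cpos then occf cpos ++ [i] else occf c))).flatten.foldl
        lexUpdate none) =
    lexUpdate ((((u ++ cpos :: w).map (fun c => pairsConsec (occf c))).flatten).foldl
        lexUpdate none) (v, i)
  rw [hmap, List.map_append, List.map_cons]
  exact foldl_insert_middle _ _ _ _ _

theorem stepA_eq (cA : Int × Int) (dA : PySem.Dict (List Char) Int) (shA : List Int)
    (slA : Option Int) (i : Int) (x : Char) :
    solutionStepA (cA, dA, shA, slA) (i, x) =
      (let cpos : Int × Int :=
        if x = 'L' then (cA.1 - 1, cA.2)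
        else if x = 'R' then (cA.1 + 1, cA.2)
        else if x = 'U' then (cA.1, cA.2 + 1)
        else (cA.1, cA.2 - 1)
      (cpos, dA.insert (coordToString cpos) i,
        match dA.get? (coordToString cpos), slA with
        | some loc, none => ([loc + 2, i + 1], some (i - loc))
        | some loc, some l =>
            if i - loc < l then ([loc + 2, i + 1], some (i - loc)) else (shA, slA)
        | none, _ => (shA, slA))) := by
  simp only [solutionStepA]
  rcases hget : dA.get? (coordToString
      (if x = 'L' then (cA.1 - 1, cA.2)
       else if x = 'R' then (cA.1 + 1, cA.2)
       else if x = 'U' then (cA.1, cA.2 + 1)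
       else (cA.1, cA.2 - 1))) with _ | loc <;>
    rcases slA with _ | l <;> simp only [hget] <;> (try split_ifs) <;> rfl

theorem step_preserve (i : Int) (x : Char)
    (stA : (Int × Int) × PySem.Dict (List Char) Int × List Int × Option Int)
    (stB : (Int × Int) × PySem.Dict (Int × Int) (List Int))
    (coords : List (Int × Int)) (occf : Int × Int → List Int)
    (h : InvAB i stA stB coords occf) :
    ∃ coords' occf', InvAB (i + 1) (solutionStepA stA (i, x)) (solutionStepB stB (i, x)) coords' occf' := by
  obtain ⟨cA, dA, shA, slA⟩ := stA
  obtain ⟨cB, dB⟩ := stB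
  obtain ⟨h1, h2, h3, h4, h5, h6, h7, h8⟩ := h
  simp only at h1 h2 h3 h6
  subst h1
  set cpos : Int × Int :=
    (if x = 'L' then (cA.1 - 1, cA.2)
     else if x = 'R' then (cA.1 + 1, cA.2)
     else if x = 'U' then (cA.1, cA.2 + 1)
     else (cA.1, cA.2 - 1)) with hcpos
  have hgetB : dB.get? cpos = if cpos ∈ coords then some (occf cpos) else none := by
    show ((dB.items.find? (fun p => p.1 == cpos)).map (fun x => x.2)) = _
    rw [h3, find?_keyed]
    split_ifs <;> simp
  have hgetDB : dB.getD cpos [] = if cpos ∈ coords then occf cpos else [] := by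
    rw [PySem.Dict.getD, hgetB]
    split_ifs <;> simp
  have hcontB : dB.contains cpos = decide (cpos ∈ coords) := by
    show dB.items.any (fun p => p.1 == cpos) = _
    rw [h3]
    by_cases hmem : cpos ∈ coords
    · rw [decide_eq_true hmem]
      exact List.any_eq_true.2 ⟨(cpos, occf cpos), List.mem_map.2 ⟨cpos, hmem, rfl⟩, by simp⟩
    · rw [decide_eq_false hmem]
      refine List.any_eq_false.2 (fun p hp => ?_)
      obtain ⟨c, hc, rfl⟩ := List.mem_map.1 hp
      simp only [beq_iff_eq]
      exact fun heq : c = cpos => hmem (heq ▸ hc)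
  refine ⟨if cpos ∈ coords then coords else coords ++ [cpos],
          fun c => if c = cpos then occf cpos ++ [i] else occf c, ?_⟩
  have hBstep : solutionStepB (cA, dB) (i, x) =
      (cpos, dB.insert cpos (dB.getD cpos [] ++ [i])) := rfl
  have hitems : (dB.insert cpos (dB.getD cpos [] ++ [i])).items =
      (if cpos ∈ coords then coords else coords ++ [cpos]).map
        (fun c => (c, if c = cpos then occf cpos ++ [i] else occf c)) := by
    rw [PySem.Dict.insert]
    by_cases hm : cpos ∈ coords
    · rw [if_pos (by rw [hcontB]; simpa)]
      simp only [if_pos hm]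
      rw [h3, List.map_map]
      refine List.map_congr_left (fun c hc => ?_)
      by_cases hceq : c = cpos
      · subst hceq
        simp [Function.comp, hgetDB, hm]
      · simp only [Function.comp_apply]
        rw [show ((c, occf c).1 == cpos) = false by simpa using hceq]
        simp [hceq]
    · rw [if_neg (by rw [hcontB]; simpa)]
      simp only [if_neg hm]
      rw [h3, List.map_append, List.map_cons, List.map_nil]
      rw [hgetDB, if_neg hm]
      have hemp0 : occf cpos = [] := by
        by_contra hne
        exact hm ((h5 cpos).2 hne)
      congr 1
      · refine List.map_congr_left (fun c hc => ?_)
        rw [if_neg (fun heq : c = cpos => hm (heq ▸ hc))]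
      · simp [hemp0]
  have hlookA : dA.get? (coordToString cpos) = (occf cpos).getLast? := h2 cpos
  rw [stepA_eq, hBstep]
  simp only []
  rw [← hcpos]
  by_cases hm : cpos ∈ coords
  · have hne : occf cpos ≠ [] := (h5 cpos).1 hm
    obtain ⟨v, hv⟩ := Option.ne_none_iff_exists'.1 (mt List.getLast?_eq_none_iff.1 hne)
    have hkey : dA.get? (coordToString cpos) = some v := by rw [hlookA, hv]
    refine ⟨rfl, ?_, by simpa only using hitems, by simp [hm, h4], ?_, ?_, by omega, ?_⟩
    · intro c
      by_cases hceq : c = cpos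
      · subst hceq
        simp only [if_pos rfl]
        rw [PySem.Dict.get?_insert_self]
        simp
      · simp only [if_neg hceq]
        rw [PySem.Dict.get?_insert_of_ne _ _ (fun he => hceq (coordToString_inj _ _ he))]
        exact h2 c
    · intro c
      simp only [if_pos hm]
      by_cases hceq : c = cpos
      · subst hceq
        simp [hm]
      · simp only [if_neg hceq]
        exact h5 c
    · -- the best-so-far clause
      simp only [if_pos hm]
      rw [best_step coords occf cpos v i hm h4 hv]
      rcases foldl_lexUpdate_range (candFlat coords occf) none with hbst | ⟨ab, habmem, hbst⟩
      · rw [hbst] at h6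
        have hsl : slA = none := congrArg Prod.snd h6
        rw [hbst, hsl]
        simp only [hkey, lexUpdate, encodeA]
        refine Prod.ext ?_ rfl
        simp only [List.cons.injEq, and_true]
        omega
      · obtain ⟨c0, hc0, habp⟩ := mem_candFlat habmem
        have hb_lt : ab.2 < i := (h8 c0 ab.2 (mem_pairsConsec habp).2).2
        rw [hbst] at h6
        have hsl : slA = some (ab.2 - ab.1) := congrArg Prod.snd h6
        rw [hbst, hsl]
        simp only [hkey]
        by_cases hlt : i - v < ab.2 - ab.1
        · simp only [if_pos hlt, lexUpdate]
          rw [if_pos (Or.inl hlt)]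
          simp only [encodeA]
          refine Prod.ext ?_ rfl
          simp only [List.cons.injEq, and_true]
          omega
        · have hcond : ¬(i - v < ab.2 - ab.1 ∨ (i - v = ab.2 - ab.1 ∧ i < ab.2)) := by
            rintro (hc | ⟨_, hc⟩)
            · exact hlt hc
            · omega
          simp only [if_neg hlt, lexUpdate]
          rw [if_neg hcond]
          rw [hsl] at h6
          exact h6
    · intro c y hy
      by_cases hceq : c = cpos
      · subst hceq
        simp only [if_pos rfl] at hy
        rcases List.mem_append.1 hy with hy | hy
        · have := h8 cpos y hy; omega
        · simp at hy; omega
      · simp only [if_neg hceq] at hy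
        have := h8 c y hy
        omega
  · have hemp : occf cpos = [] := by
      by_contra hne
      exact hm ((h5 cpos).2 hne)
    have hkey : dA.get? (coordToString cpos) = none := by rw [hlookA, hemp]; rfl
    refine ⟨rfl, ?_, by simpa only using hitems, ?_, ?_, ?_, by omega, ?_⟩
    · intro c
      by_cases hceq : c = cpos
      · subst hceq
        simp only [if_pos rfl]
        rw [PySem.Dict.get?_insert_self]
        simp
      · simp only [if_neg hceq]
        rw [PySem.Dict.get?_insert_of_ne _ _ (fun he => hceq (coordToString_inj _ _ he))]
        exact h2 c
    · simp only [if_neg hm]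
      refine List.Nodup.append h4 (List.nodup_singleton _) ?_
      intro a ha hb
      simp only [List.mem_singleton] at hb
      exact hm (hb ▸ ha)
    · intro c
      simp only [if_neg hm, List.mem_append, List.mem_singleton]
      by_cases hceq : c = cpos
      · subst hceq
        simp [hemp]
      · simp only [if_neg hceq, or_iff_left hceq]
        exact h5 c
    · simp only [if_neg hm, hkey]
      have hsame : candFlat (coords ++ [cpos])
          (fun c => if c = cpos then occf cpos ++ [i] else occf c) =
          candFlat coords occf := by
        show (((coords ++ [cpos]).map
            (fun c => pairsConsec (if c = cpos then occf cpos ++ [i] else occf c))).flatten) = _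
        rw [List.map_append, List.map_cons, List.map_nil]
        rw [List.map_congr_left (fun c hc =>
          congrArg pairsConsec (if_neg (fun heq : c = cpos => hm (heq ▸ hc))))]
        rw [show pairsConsec (if cpos = cpos then occf cpos ++ [i] else occf cpos) = [] by
          rw [if_pos rfl, hemp]
          rfl]
        simp [candFlat]
      rw [hsame]
      exact h6
    · intro c y hy
      by_cases hceq : c = cpos
      · subst hceq
        simp only [if_pos rfl] at hy
        rcases List.mem_append.1 hy with hy | hy
        · have := h8 cpos y hy; omega
        · simp at hy; omega
      · simp only [if_neg hceq] at hy
        have := h8 c y hy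
        omega

theorem main_loop (t : List Char) :
    ∀ (i : Int) stA stB coords occf, InvAB i stA stB coords occf →
      ∃ i' coords' occf',
        InvAB i' ((PySem.List.enumerate t i).foldl solutionStepA stA)
          ((PySem.List.enumerate t i).foldl solutionStepB stB) coords' occf' := by
  induction t with
  | nil => intro i stA stB coords occf h; exact ⟨i, coords, occf, h⟩
  | cons x t ih =>
    intro i stA stB coords occf h
    obtain ⟨coords', occf', h'⟩ := step_preserve i x stA stB coords occf h
    simpa [PySem.List.enumerate] using ih (i + 1) _ _ coords' occf' h'

theorem final_eq (i : Int)
    (stA : (Int × Int) × PySem.Dict (List Char) Int × List Int × Option Int)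
    (stB : (Int × Int) × PySem.Dict (Int × Int) (List Int))
    (coords : List (Int × Int)) (occf : Int × Int → List Int)
    (h : InvAB i stA stB coords occf) :
    (if PySem.List.pyGet? stA.2.2.1 0 ≠ some (-1) then stA.2.2.1 else [-1]) =
      (match stB.2.values.foldl
          (fun best idxs => (idxs.zip (PySem.List.slice idxs (some 1) none)).foldl lexUpdate best)
          none with
        | none => [-1]
        | some t => [t.2 - t.1 + 2, t.2 + 1]) := by
  obtain ⟨h1, h2, h3, h4, h5, h6, h7, h8⟩ := h
  have hslice : ∀ idxs : List Int, PySem.List.slice idxs (some 1) none = idxs.tail := by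
    intro idxs
    cases idxs <;> simp [PySem.List.slice, PySem.List.clampIdx]
  have hvals : stB.2.values = coords.map occf := by
    show stB.2.items.map (fun x => x.2) = _
    rw [h3, List.map_map]
    rfl
  have hBfold : stB.2.values.foldl
      (fun best idxs => (idxs.zip (PySem.List.slice idxs (some 1) none)).foldl lexUpdate best)
      none = (candFlat coords occf).foldl lexUpdate none := by
    rw [hvals]
    unfold candFlat
    simp only [hslice]
    rw [List.foldl_flatten, List.foldl_map, List.foldl_map]
    rfl
  rw [hBfold]
  rcases foldl_lexUpdate_range (candFlat coords occf) none with hbst | ⟨ab, habmem, hbst⟩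
  · rw [hbst] at h6 ⊢
    have hsh : stA.2.2.1 = [-1, -1] := congrArg Prod.fst h6
    rw [hsh]
    rw [if_neg (by
      rw [show PySem.List.pyGet? [(-1 : Int), -1] (0 : Int) = some (-1) from rfl]
      simp)]
  · obtain ⟨c0, hc0, habp⟩ := mem_candFlat habmem
    have hlo : -1 ≤ ab.1 := (h8 c0 ab.1 (mem_pairsConsec habp).1).1
    rw [hbst] at h6 ⊢
    have hsh : stA.2.2.1 = [ab.2 - (ab.2 - ab.1) + 2, ab.2 + 1] := congrArg Prod.fst h6
    rw [hsh]
    have hg0 : PySem.List.pyGet? [ab.2 - (ab.2 - ab.1) + 2, ab.2 + 1] (0 : Int)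
        = some (ab.2 - (ab.2 - ab.1) + 2) := rfl
    have hcond : PySem.List.pyGet? [ab.2 - (ab.2 - ab.1) + 2, ab.2 + 1] (0 : Int) ≠ some (-1) := by
      rw [hg0]
      intro hcon
      have h' := Option.some.inj hcon
      omega
    rw [if_pos hcond]

theorem init_inv :
    InvAB 0 ((0, 0), (PySem.Dict.mk []).insert (coordToString (0, 0)) (-1), [-1, -1], none)
      ((0, 0), (PySem.Dict.mk []).insert ((0 : Int), (0 : Int)) [-1])
      [(0, 0)] (fun c => if c = (0, 0) then [-1] else []) := by
  refine ⟨rfl, ?_, ?_, by simp, ?_, rfl, le_refl 0, ?_⟩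
  · intro c
    by_cases hc : c = (0, 0)
    · subst hc
      simp only [if_pos rfl]
      rw [PySem.Dict.get?_insert_self]
      rfl
    · simp only [if_neg hc]
      rw [PySem.Dict.get?_insert_of_ne _ _ (fun he => hc (coordToString_inj _ _ he))]
      rfl
  · rfl
  · intro c
    by_cases hc : c = (0, 0) <;> simp [hc]
  · intro c y hy
    by_cases hc : c = (0, 0)
    · simp only [if_pos hc] at hy
      simp only [List.mem_singleton] at hy
      omega
    · simp only [if_neg hc] at hy
      simp at hy

-- ===== VERDICT (by name: the statement is the Claim_ definition above) =====
theorem solution_spec : Claim_equal_solution := by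
  intro s _
  unfold Spec_solution solution solution_alt
  obtain ⟨i', coords', occf', hInv⟩ :=
    main_loop s.toList 0 _ _ _ _ init_inv
  exact final_eq i' _ _ coords' occf' hInv
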